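-- pv_equiv track=rewrite | github.com/apecuch/FIUBA-Algoritmos-y-Programacion-I | FINAL/2020c2f1.py | filtrar_valores_unicos
-- ===== SOURCE A (Python) =====
-- def filtrar_valores_unicos(data:list, key:str):
--     data_filtrada:list = []
--     valores_unicos:dict = {}
--
--     for x in data:
--         valor_por_clave = x[key]
--         valores_unicos[valor_por_clave] = x
--
--     data_filtrada = list(valores_unicos.keys())
--
--     return data_filtrada
-- ===== SOURCE B (Python) =====
-- def filtrar_valores_unicos(data: list, key: str):
--     vals = [x[key] for x in data]
--     return _dedup([], vals)
--
-- def _dedup(prefix, vals):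
--     # recursively drop every value already present in the processed prefix
--     if not vals:
--         return []
--     v, rest = vals[0], vals[1:]
--     tail = _dedup(prefix + [v], rest)
--     return tail if v in prefix else [v] + tail
-- ===== Notes on version B (the rewrite author's own statement) =====
-- stated objective: alternative
-- what changed: B first extracts the list of key values in a separate pass and then deduplicates it by structural recursion against the growing processed prefix, instead of A's single iterative pass inserting whole records into a dict and reading its keys.
import Mathlib
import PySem

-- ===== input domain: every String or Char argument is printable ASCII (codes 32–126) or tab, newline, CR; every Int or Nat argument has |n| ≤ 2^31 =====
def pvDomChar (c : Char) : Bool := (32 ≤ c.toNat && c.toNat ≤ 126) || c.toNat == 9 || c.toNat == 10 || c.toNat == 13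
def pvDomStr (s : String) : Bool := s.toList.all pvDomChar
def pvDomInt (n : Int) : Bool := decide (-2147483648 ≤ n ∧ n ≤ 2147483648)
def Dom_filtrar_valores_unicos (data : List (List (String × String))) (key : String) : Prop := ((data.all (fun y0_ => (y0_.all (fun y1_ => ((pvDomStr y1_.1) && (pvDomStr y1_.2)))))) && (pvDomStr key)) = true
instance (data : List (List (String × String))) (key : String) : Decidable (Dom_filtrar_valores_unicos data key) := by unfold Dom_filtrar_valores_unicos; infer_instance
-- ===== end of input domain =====

-- B extracts the key values in one pass and deduplicates them by structural recursion on the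
-- value list against the processed prefix, instead of A's dict-of-records-then-keys loop (alternative).
-- ===== PORT A =====
-- A: insert each record into a dict keyed by its value at `key` (overwrite keeps position),
-- then return the dict's keys. x[key] on an assoc-list record is List.lookup (first match).
def filtrar_valores_unicos (data : List (List (String × String))) (key : String) : List String :=
  (data.foldl
    (fun (valores_unicos : PySem.Dict String (List (String × String))) x =>
      match x.lookup key with
      | some valor_por_clave => valores_unicos.insert valor_por_clave x
      | none => valores_unicos)   -- Python raises KeyError here; excluded by Pre_
    PySem.Dict.empty).keys

-- ===== PORT B =====
-- B helper _dedup: keep v iff it is not in the processed prefix; recurse with prefix + [v].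
def fvuDedup (pre : List String) (vals : List String) : List String :=
  match vals with
  | [] => []
  | v :: rest =>
      let tail := fvuDedup (pre ++ [v]) rest
      if pre.contains v then tail else v :: tail

-- B: vals = [x[key] for x in data] (under Pre_ every lookup succeeds; getD is exact there,
-- Python raises KeyError outside Pre_), then _dedup([], vals).
def filtrar_valores_unicos_alt (data : List (List (String × String))) (key : String) : List String :=
  fvuDedup [] (data.map (fun x => (x.lookup key).getD ""))

-- ===== PRECONDITION & SPEC =====
-- Pre_: every record contains `key`; otherwise Python A (and B) raise KeyError.
def Pre_filtrar_valores_unicos (data : List (List (String × String))) (key : String) : Prop :=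
  ∀ x ∈ data, (x.lookup key).isSome = true
instance (data : List (List (String × String))) (key : String) : Decidable (Pre_filtrar_valores_unicos data key) := by unfold Pre_filtrar_valores_unicos; infer_instance
def pvWitness_filtrar_valores_unicos : (List (List (String × String))) × String :=
  ([[("k", "a")], [("k", "b"), ("j", "c")], [("k", "a")]], "k")
def Spec_filtrar_valores_unicos (data : List (List (String × String))) (key : String) (out : List String) : Prop := out = filtrar_valores_unicos_alt data key
instance (data : List (List (String × String))) (key : String) (out : List String) : Decidable (Spec_filtrar_valores_unicos data key out) := by unfold Spec_filtrar_valores_unicos; infer_instance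

-- ===== CLAIM =====
def Claim_equal_filtrar_valores_unicos : Prop := ∀ (data : List (List (String × String))) (key : String), Dom_filtrar_valores_unicos data key → Pre_filtrar_valores_unicos data key → Spec_filtrar_valores_unicos data key (filtrar_valores_unicos data key)

-- ===== LEMMAS AND PROOFS =====

-- fvuDedup only depends on the prefix through membership.
lemma fvuDedup_congr (l : List String) : ∀ (p q : List String),
    (∀ v, p.contains v = q.contains v) → fvuDedup p l = fvuDedup q l := by
  induction l with
  | nil => intro p q h; rfl
  | cons v rest ih =>
    intro p q h
    have hv : (v ∈ p) ↔ (v ∈ q) := by have := h v; simpa using this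
    have h' : ∀ w, (p ++ [v]).contains w = (q ++ [v]).contains w := by
      intro w; have hw := h w; simp at hw ⊢; simp [hw]
    simp only [fvuDedup, ih _ _ h']
    by_cases hp : v ∈ p
    · simp [hp, hv.mp hp]
    · have hq : v ∉ q := fun hq => hp (hv.mpr hq); simp [hp, hq]

-- Loop invariant: the keys of A's dict after processing `data` are fvuDedup of the current
-- keys and the remaining values.
lemma fvu_loop (key : String) (data : List (List (String × String)))
    (hpre : ∀ x ∈ data, (x.lookup key).isSome = true)
    (d : PySem.Dict String (List (String × String))) :
    (data.foldl
      (fun (valores_unicos : PySem.Dict String (List (String × String))) x =>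
        match x.lookup key with
        | some valor_por_clave => valores_unicos.insert valor_por_clave x
        | none => valores_unicos)
      d).keys
    = d.keys ++ fvuDedup d.keys (data.map (fun x => (x.lookup key).getD "")) := by
  induction data generalizing d with
  | nil => simp [fvuDedup]
  | cons x xs ih =>
    obtain ⟨v, hv⟩ := Option.isSome_iff_exists.mp (hpre x (by simp))
    have hxs : ∀ y ∈ xs, (y.lookup key).isSome = true := fun y hy => hpre y (by simp [hy])
    simp only [List.foldl_cons, List.map_cons, hv, Option.getD_some, fvuDedup]
    by_cases hm : v ∈ d.keys
    · have hc : d.contains v = true := by rw [PySem.Dict.contains_iff_mem_keys]; exact hm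
      have hkeys : (d.insert v x).keys = d.keys :=
        PySem.Dict.keys_insert_of_contains d x hc
      have hcongr : fvuDedup (d.keys ++ [v]) (xs.map (fun x => (x.lookup key).getD ""))
          = fvuDedup d.keys (xs.map (fun x => (x.lookup key).getD "")) := by
        apply fvuDedup_congr
        intro w; by_cases hw : w = v <;> simp [hw, hm]
      rw [ih hxs (d.insert v x), hkeys]
      simp [hm, hcongr]
    · have hc : d.contains v = false := by
        have := (PySem.Dict.contains_iff_mem_keys (d := d) (k := v))
        simp [hm] at this; simpa using this
      have hkeys : (d.insert v x).keys = d.keys ++ [v] :=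
        PySem.Dict.keys_insert_of_not_contains d x hc
      rw [ih hxs (d.insert v x), hkeys]
      simp [hm]

-- ===== VERDICT =====
theorem filtrar_valores_unicos_spec : Claim_equal_filtrar_valores_unicos := by
  intro data key _ hpre
  unfold Spec_filtrar_valores_unicos filtrar_valores_unicos filtrar_valores_unicos_alt
  simpa using fvu_loop key data hpre PySem.Dict.empty
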